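-- pv_equiv track=rewrite | github.com/YufeiG/adventofcode2020 | script14.py | convert_mask_and
-- ===== SOURCE A (Python) =====
-- def convert_mask_and(mask_string):
-- 	mask = 0
-- 	for i, c in enumerate(mask_string):
-- 		if c != "0":
-- 			mask += 1
-- 		if len(mask_string) -1 != i:
-- 			mask = mask << 1
-- 	return mask
-- ===== SOURCE B (Python) =====
-- def convert_mask_and(mask_string):
--     bits = ''.join('0' if c == '0' else '1' for c in mask_string)
--     return int(bits, 2) if bits else 0
-- ===== Notes on version B (the rewrite author's own statement) =====
-- stated objective: idiomatic
-- what changed: B maps each character to a binary digit ('0' stays '0', anything else becomes '1') and parses the joined string with int(bits, 2) in one step, instead of A's per-character accumulator with conditional increments and shifts.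
import Mathlib
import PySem

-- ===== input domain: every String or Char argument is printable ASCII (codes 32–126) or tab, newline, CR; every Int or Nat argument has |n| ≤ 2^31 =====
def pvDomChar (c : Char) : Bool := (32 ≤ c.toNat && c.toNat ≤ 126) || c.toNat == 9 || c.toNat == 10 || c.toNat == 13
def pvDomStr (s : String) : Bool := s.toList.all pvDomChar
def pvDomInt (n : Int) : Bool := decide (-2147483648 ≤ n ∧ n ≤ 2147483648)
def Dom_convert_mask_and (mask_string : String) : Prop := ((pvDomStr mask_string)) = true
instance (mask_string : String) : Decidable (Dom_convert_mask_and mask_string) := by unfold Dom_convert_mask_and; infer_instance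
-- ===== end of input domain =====

-- B maps each character to a binary digit and parses the joined string with int(bits, 2);
-- equivalence of return values is proved on the whole domain (A is total).

-- ===== PORT A =====
def convert_mask_and (mask_string : String) : Int :=
  (PySem.List.enumerate mask_string.toList).foldl
    (fun mask ic =>
      let mask := if ic.2 ≠ '0' then mask + 1 else mask
      if (mask_string.toList.length : Int) - 1 ≠ ic.1 then mask <<< (1 : Nat) else mask)
    0

-- ===== PORT B =====
-- int(bits, 2) is ported by hand as a left fold over the digit characters
-- (exact here: bits consists only of '0'/'1', so no sign/underscore/error cases arise).
def pyParseBin (bits : List Char) : Int :=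
  bits.foldl (fun acc c => 2 * acc + (if c = '1' then 1 else 0)) 0

def convert_mask_and_alt (mask_string : String) : Int :=
  let bits := mask_string.toList.map (fun c => if c = '0' then '0' else '1')
  if bits.isEmpty then 0 else pyParseBin bits

-- ===== PRECONDITION & SPEC =====
def Spec_convert_mask_and (mask_string : String) (out : Int) : Prop := out = convert_mask_and_alt mask_string
instance (mask_string : String) (out : Int) : Decidable (Spec_convert_mask_and mask_string out) := by unfold Spec_convert_mask_and; infer_instance

-- ===== CLAIM (what is proved, stated in full; the proofs are below) =====
def Claim_equal_convert_mask_and : Prop := ∀ (mask_string : String), Dom_convert_mask_and mask_string → Spec_convert_mask_and mask_string (convert_mask_and mask_string)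

-- ===== LEMMAS AND PROOFS =====

-- parsing with a nonzero initial accumulator scales it by 2^length
theorem pyParseBin_init (cs : List Char) (m : Int) :
    cs.foldl (fun acc c => 2 * acc + (if c = '1' then 1 else 0)) m
      = (2 : Int) ^ cs.length * m + pyParseBin cs := by
  induction cs generalizing m with
  | nil => simp only [List.foldl_nil, pyParseBin, pow_zero, one_mul, List.length_nil]; ring
  | cons c cs ih =>
      simp only [List.foldl_cons, pyParseBin, List.length_cons] at *
      rw [ih, ih (2 * 0 + if c = '1' then 1 else 0)]
      ring

-- A's loop over the tail of the enumeration (indices i, i+cs.length-1 = n-1 when cs covers a suffix)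
theorem loopA_eq (n : Int) (cs : List Char) (i : Int) (m : Int)
    (h : i + cs.length = n) (hne : cs ≠ []) :
    (PySem.List.enumerate cs i).foldl
      (fun (mask : Int) ic =>
        let mask := if ic.2 ≠ '0' then mask + 1 else mask
        if n - 1 ≠ ic.1 then mask <<< (1 : Nat) else mask) m
    = (2 : Int) ^ (cs.length - 1) * m
      + pyParseBin (cs.map (fun c => if c = '0' then '0' else '1')) := by
  induction cs generalizing i m with
  | nil => exact absurd rfl hne
  | cons c cs ih =>
      rw [PySem.List.enumerate_cons]
      simp only [List.foldl_cons]
      cases cs with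
      | nil =>
          have hi : n - 1 = i := by simp at h; omega
          rw [PySem.List.enumerate_nil]
          simp only [List.foldl_cons, List.foldl_nil, List.map_cons, List.map_nil,
            List.length_cons, List.length_nil, hi, ne_eq, not_true_eq_false, if_false,
            pyParseBin]
          by_cases hc : c = '0' <;> simp [hc]
      | cons d ds =>
          have hne2 : (d :: ds) ≠ [] := by simp
          have h2 : (i + 1) + ((d :: ds).length : Int) = n := by
            simp at h ⊢; omega
          have hni : n - 1 ≠ i := by simp at h; omega
          have hshift : ∀ x : Int, x <<< (1 : Nat) = 2 * x := by
            intro x; rw [Int.shiftLeft_eq]; ring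
          have hpb : ∀ (e : Char) (es : List Char), pyParseBin (e :: es)
              = (2 : Int) ^ es.length * (if e = '1' then 1 else 0) + pyParseBin es := by
            intro e es
            simp only [pyParseBin, List.foldl_cons]
            rw [pyParseBin_init]
            simp only [pyParseBin]
            ring
          rw [ih _ _ h2 hne2]
          simp only [List.map_cons, hpb]
          simp only [hshift, hni, ne_eq, not_false_iff, if_true,
            List.length_map, List.length_cons, Nat.add_sub_cancel]
          by_cases hc : c = '0' <;> simp [hc] <;> ring

-- ===== VERDICT (by name: the statement is the Claim_ definition above) =====
theorem convert_mask_and_spec : Claim_equal_convert_mask_and := by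
  intro s _
  unfold Spec_convert_mask_and convert_mask_and convert_mask_and_alt
  cases hs : s.toList with
  | nil => simp [PySem.List.enumerate]
  | cons c cs =>
      have hne : (c :: cs) ≠ [] := by simp
      rw [loopA_eq ((c :: cs).length : Int) (c :: cs) 0 0 (by simp) hne]
      simp [pyParseBin]
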